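-- pv_equiv track=rewrite | github.com/gizemcell/Blind-Valley | Blind_Valley/blind_valley.py | find_searchlist
-- ===== SOURCE A (Python) =====
-- def find_searchlist(temp):
--     all_items = []
--     searching_list = []
--     for i in temp:
--         all_items.extend(i)
--     for j in range(len(all_items)):
--         if all_items[j] == "U" or all_items[j] == "L":
--             searching_list.append(j)
--     return searching_list
-- ===== SOURCE B (Python) =====
-- def find_searchlist(temp):
--     searching_list = []
--     offset = 0
--     for row in temp:
--         for x in row:
--             if x == "U" or x == "L":
--                 searching_list.append(offset)
--             offset += 1
--     return searching_list
-- ===== Notes on version B (the rewrite author's own statement) =====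
-- stated objective: simpler
-- what changed: Single fused nested loop tracking a running flat offset replaces building the flattened all_items list and then scanning it by index.
import Mathlib
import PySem

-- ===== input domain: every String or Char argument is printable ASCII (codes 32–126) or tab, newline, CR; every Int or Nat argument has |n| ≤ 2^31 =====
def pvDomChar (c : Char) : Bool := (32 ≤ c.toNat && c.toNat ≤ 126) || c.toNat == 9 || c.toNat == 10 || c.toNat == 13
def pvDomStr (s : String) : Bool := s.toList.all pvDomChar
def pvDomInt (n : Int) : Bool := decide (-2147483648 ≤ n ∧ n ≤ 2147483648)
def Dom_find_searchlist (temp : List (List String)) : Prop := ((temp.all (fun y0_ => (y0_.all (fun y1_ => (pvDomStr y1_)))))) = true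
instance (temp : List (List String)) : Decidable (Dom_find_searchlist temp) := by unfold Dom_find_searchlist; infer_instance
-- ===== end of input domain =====

-- B fuses A's flatten-then-index-scan into one nested loop with a running flat offset (simpler; no intermediate list).


-- ===== PORT A =====
-- all_items built by extending across rows; then an index loop over range(len(all_items)).
def find_searchlist (temp : List (List String)) : List Int :=
  let all_items := temp.foldl (fun acc i => acc ++ i) []
  (List.range all_items.length).foldl
    (fun searching_list j =>
      if all_items.getD j "" == "U" || all_items.getD j "" == "L" then
        searching_list ++ [(j : Int)]
      else searching_list) []

-- ===== PORT B =====
-- one fused pass: state = (result list, running flat offset)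
def find_searchlist_alt (temp : List (List String)) : List Int :=
  (temp.foldl
    (fun st row =>
      row.foldl
        (fun p x =>
          (if x == "U" || x == "L" then p.1 ++ [p.2] else p.1, p.2 + 1))
        st)
    (([] : List Int), (0 : Int))).1

-- ===== PRECONDITION & SPEC =====
def Spec_find_searchlist (temp : List (List String)) (out : List Int) : Prop := out = find_searchlist_alt temp
instance (temp : List (List String)) (out : List Int) : Decidable (Spec_find_searchlist temp out) := by unfold Spec_find_searchlist; infer_instance

-- ===== CLAIM (what is proved, stated in full; the proofs are below) =====
def Claim_equal_find_searchlist : Prop := ∀ (temp : List (List String)), Dom_find_searchlist temp → Spec_find_searchlist temp (find_searchlist temp)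

-- ===== LEMMAS AND PROOFS =====

-- canonical form: indices (starting at k) of "U"/"L" elements of a flat list
def pvF : List String → Int → List Int
  | [], _ => []
  | x :: xs, k => (if x == "U" || x == "L" then [k] else []) ++ pvF xs (k + 1)

theorem pvF_append (l₁ l₂ : List String) (k : Int) :
    pvF (l₁ ++ l₂) k = pvF l₁ k ++ pvF l₂ (k + l₁.length) := by
  induction l₁ generalizing k with
  | nil => simp [pvF]
  | cons x xs ih =>
      simp only [List.cons_append, pvF, ih, List.length_cons]
      have : k + 1 + (xs.length : Int) = k + ((xs.length : Int) + 1) := by ring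
      rw [this]
      simp [List.append_assoc]

theorem pvRow_foldl (row : List String) (res : List Int) (off : Int) :
    row.foldl
      (fun p x => (if x == "U" || x == "L" then p.1 ++ [p.2] else p.1, p.2 + 1))
      (res, off)
    = (res ++ pvF row off, off + row.length) := by
  induction row generalizing res off with
  | nil => simp [pvF]
  | cons x xs ih =>
      simp only [List.foldl_cons, ih, pvF, List.length_cons, Prod.mk.injEq]
      refine ⟨?_, ?_⟩
      · split <;> simp [List.append_assoc]
      · push_cast; ring

theorem pvOuter_foldl (temp : List (List String)) (res : List Int) (off : Int) :
    temp.foldl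
      (fun st row =>
        row.foldl
          (fun p x => (if x == "U" || x == "L" then p.1 ++ [p.2] else p.1, p.2 + 1))
          st)
      (res, off)
    = (res ++ pvF temp.flatten off, off + temp.flatten.length) := by
  induction temp generalizing res off with
  | nil => simp [pvF]
  | cons r rs ih =>
      simp only [List.foldl_cons, pvRow_foldl, ih, List.flatten_cons, pvF_append,
        Prod.mk.injEq, List.length_append]
      refine ⟨?_, ?_⟩
      · simp [List.append_assoc]
      · push_cast; ring

theorem pvB_eq (temp : List (List String)) :
    find_searchlist_alt temp = pvF temp.flatten 0 := by
  unfold find_searchlist_alt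
  rw [pvOuter_foldl]
  simp

theorem pvFoldl_append_eq_flatten (temp : List (List String)) (acc : List String) :
    temp.foldl (fun acc i => acc ++ i) acc = acc ++ temp.flatten := by
  induction temp generalizing acc with
  | nil => simp
  | cons r rs ih => simp [ih, List.append_assoc]

theorem pvRange_foldl (l : List String) (acc : List Int) (c : Int) :
    (List.range l.length).foldl
      (fun sl j =>
        if l.getD j "" == "U" || l.getD j "" == "L" then sl ++ [(j : Int) + c] else sl)
      acc
    = acc ++ pvF l c := by
  induction l generalizing acc c with
  | nil => simp [pvF]
  | cons x xs ih =>
      rw [List.length_cons, List.range_succ_eq_map]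
      simp only [List.foldl_cons, List.foldl_map]
      have hfun :
          (fun (sl : List Int) (j : Nat) =>
            if (x :: xs).getD (j + 1) "" == "U" || (x :: xs).getD (j + 1) "" == "L" then
              sl ++ [((j + 1 : Nat) : Int) + c] else sl)
          = (fun (sl : List Int) (j : Nat) =>
            if xs.getD j "" == "U" || xs.getD j "" == "L" then sl ++ [(j : Int) + (c + 1)] else sl) := by
        funext sl j
        have h : ((j : Int) + 1) + c = (j : Int) + (c + 1) := by ring
        simp only [List.getD_cons_succ, Nat.cast_add, Nat.cast_one, h]
      rw [hfun, ih]
      simp only [pvF, List.getD_cons_zero, Nat.cast_zero, zero_add]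
      by_cases hx : (x == "U" || x == "L") = true
      · simp only [if_pos hx, List.append_assoc, List.singleton_append]
      · simp only [if_neg hx, List.nil_append]

theorem pvA_eq (temp : List (List String)) :
    find_searchlist temp = pvF temp.flatten 0 := by
  unfold find_searchlist
  rw [pvFoldl_append_eq_flatten, List.nil_append]
  have hfun :
      (fun (sl : List Int) (j : Nat) =>
        if temp.flatten.getD j "" == "U" || temp.flatten.getD j "" == "L" then
          sl ++ [(j : Int)] else sl)
      = (fun (sl : List Int) (j : Nat) =>
        if temp.flatten.getD j "" == "U" || temp.flatten.getD j "" == "L" then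
          sl ++ [(j : Int) + 0] else sl) := by
    funext sl j; simp
  simp only [hfun]
  exact pvRange_foldl temp.flatten [] 0

-- ===== VERDICT (by name: the statement is the Claim_ definition above) =====
theorem find_searchlist_spec : Claim_equal_find_searchlist := by
  intro temp _
  unfold Spec_find_searchlist
  rw [pvA_eq, pvB_eq]
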